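-- pv_equiv track=rewrite | github.com/maryam-tariqq/DSA-Project | src/indexing/lexicon.py | update_lexicon
-- ===== SOURCE A (Python) =====
-- def update_lexicon(lexicon, next_id, docs):
--     for doc in docs:
--         for token in doc.get("tokens", []):
--             token = token.strip()
--             if token and token not in lexicon:
--                 lexicon[token] = next_id
--                 next_id += 1
--
--     return lexicon, next_id
-- ===== SOURCE B (Python) =====
-- def update_lexicon(lexicon, next_id, docs):
--     # Flatten and strip every token up front.
--     tokens = [t.strip() for doc in docs for t in doc.get("tokens", [])]
--     # Collect genuinely new tokens in first-seen order (list membership dedupes the batch).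
--     fresh = []
--     for t in tokens:
--         if t and t not in lexicon and t not in fresh:
--             fresh.append(t)
--     # Number them consecutively from next_id (mutates lexicon in place, like A).
--     for i, t in enumerate(fresh):
--         lexicon[t] = next_id + i
--     return lexicon, next_id + len(fresh)
-- ===== Notes on version B (the rewrite author's own statement) =====
-- stated objective: alternative
-- what changed: A interleaves discovery and numbering in one nested loop over a mutating dict; B first flattens and strips all tokens into a list, collects the fresh ones by list membership, then assigns consecutive ids by enumerate-offset (next_id + i) and returns next_id + len(fresh), never consulting the dict during discovery.
import Mathlib
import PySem

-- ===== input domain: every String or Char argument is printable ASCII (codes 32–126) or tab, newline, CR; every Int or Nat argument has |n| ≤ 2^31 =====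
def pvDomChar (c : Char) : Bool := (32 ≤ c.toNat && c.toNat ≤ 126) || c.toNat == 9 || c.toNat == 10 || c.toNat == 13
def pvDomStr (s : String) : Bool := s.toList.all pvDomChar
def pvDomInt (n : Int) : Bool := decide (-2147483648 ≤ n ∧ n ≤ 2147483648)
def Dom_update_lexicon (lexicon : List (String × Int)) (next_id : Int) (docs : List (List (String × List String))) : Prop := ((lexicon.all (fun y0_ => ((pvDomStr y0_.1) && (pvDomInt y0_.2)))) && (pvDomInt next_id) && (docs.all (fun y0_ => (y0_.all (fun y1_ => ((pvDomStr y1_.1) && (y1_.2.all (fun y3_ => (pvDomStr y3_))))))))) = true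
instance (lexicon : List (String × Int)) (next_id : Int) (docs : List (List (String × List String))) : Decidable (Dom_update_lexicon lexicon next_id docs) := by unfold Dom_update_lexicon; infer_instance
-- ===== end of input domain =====

-- B flattens and strips all tokens first, collects fresh ones by list membership, then
-- numbers them consecutively by enumerate offset; same return value and same in-place
-- mutation of the lexicon dict as A; objective: alternative decomposition, not speed.


-- ===== PORT A =====
-- one token of A's inner loop: strip, then insert with the current id if new
def ulStepA (acc : PySem.Dict String Int × Int) (token : String) : PySem.Dict String Int × Int :=
  let t := PySem.Str.strip token
  if t ≠ "" ∧ acc.1.contains t = false then (acc.1.insert t acc.2, acc.2 + 1) else acc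

def update_lexicon (lexicon : List (String × Int)) (next_id : Int) (docs : List (List (String × List String))) : (List (String × Int)) × Int :=
  let r := docs.foldl (fun acc doc => ((PySem.Dict.mk doc).getD "tokens" []).foldl ulStepA acc)
    (PySem.Dict.mk lexicon, next_id)
  (r.1.items, r.2)

-- ===== PORT B =====
-- discovery loop of Source B: walk the stripped tokens, appending each genuinely new one
def ulFreshB (d0 : PySem.Dict String Int) : List String → List String → List String
  | fresh, [] => fresh
  | fresh, t :: rest =>
    if t ≠ "" ∧ d0.contains t = false ∧ fresh.contains t = false then
      ulFreshB d0 (fresh ++ [t]) rest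
    else ulFreshB d0 fresh rest

-- numbering loop of Source B: `for i, t in enumerate(fresh): lexicon[t] = next_id + i`;
-- all fresh tokens are new keys, so the pairs appended to the dict are these, in order
def ulNumber (n : Int) : List String → List (String × Int)
  | [] => []
  | t :: rest => (t, n) :: ulNumber (n + 1) rest

def update_lexicon_alt (lexicon : List (String × Int)) (next_id : Int) (docs : List (List (String × List String))) : (List (String × Int)) × Int :=
  let tokens := (docs.flatMap (fun doc => (PySem.Dict.mk doc).getD "tokens" [])).map PySem.Str.strip
  let d0 := PySem.Dict.mk lexicon
  let fresh := ulFreshB d0 [] tokens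
  (d0.items ++ ulNumber next_id fresh, next_id + (fresh.length : Int))

-- ===== PRECONDITION & SPEC =====
def Spec_update_lexicon (lexicon : List (String × Int)) (next_id : Int) (docs : List (List (String × List String))) (out : (List (String × Int)) × Int) : Prop := out = update_lexicon_alt lexicon next_id docs
instance (lexicon : List (String × Int)) (next_id : Int) (docs : List (List (String × List String))) (out : (List (String × Int)) × Int) : Decidable (Spec_update_lexicon lexicon next_id docs out) := by unfold Spec_update_lexicon; infer_instance

-- ===== CLAIM =====
def Claim_equal_update_lexicon : Prop := ∀ (lexicon : List (String × Int)) (next_id : Int) (docs : List (List (String × List String))), Dom_update_lexicon lexicon next_id docs → Spec_update_lexicon lexicon next_id docs (update_lexicon lexicon next_id docs)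

-- ===== LEMMAS AND PROOFS =====

-- A's inner step on an already-stripped token
def ulStepA' (acc : PySem.Dict String Int × Int) (t : String) : PySem.Dict String Int × Int :=
  if t ≠ "" ∧ acc.1.contains t = false then (acc.1.insert t acc.2, acc.2 + 1) else acc

-- only the NEW tokens Source B's discovery loop appends, given what is already in `fresh`
def ulNew (d0 : PySem.Dict String Int) : List String → List String → List String
  | _, [] => []
  | fresh, t :: rest =>
    if t ≠ "" ∧ d0.contains t = false ∧ fresh.contains t = false then
      t :: ulNew d0 (fresh ++ [t]) rest
    else ulNew d0 fresh rest

-- one id assignment (A's dict write, used to re-express A's fold)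
def ulAssign (acc : PySem.Dict String Int × Int) (t : String) : PySem.Dict String Int × Int :=
  (acc.1.insert t acc.2, acc.2 + 1)

theorem ulFreshB_eq (d0 : PySem.Dict String Int) (ts : List String) :
    ∀ fresh, ulFreshB d0 fresh ts = fresh ++ ulNew d0 fresh ts := by
  induction ts with
  | nil => intro fresh; simp [ulFreshB, ulNew]
  | cons t rest ih =>
    intro fresh
    simp only [ulFreshB, ulNew]
    split_ifs with h
    · rw [ih]; simp
    · rw [ih]

-- every token ulNew produces is absent from d0 and from fresh, and they are pairwise distinct
theorem ulNew_props (d0 : PySem.Dict String Int) (ts : List String) :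
    ∀ fresh, (ulNew d0 fresh ts).Nodup ∧
      ∀ x ∈ ulNew d0 fresh ts, d0.contains x = false ∧ fresh.contains x = false := by
  induction ts with
  | nil => intro fresh; simp [ulNew]
  | cons t rest ih =>
    intro fresh
    simp only [ulNew]
    split_ifs with h
    · obtain ⟨hnd, hmem⟩ := ih (fresh ++ [t])
      refine ⟨List.nodup_cons.mpr ⟨?_, hnd⟩, ?_⟩
      · intro hmemt
        have := (hmem t hmemt).2
        simp at this
      · intro x hx
        rcases List.mem_cons.mp hx with rfl | hx'
        · exact ⟨h.2.1, h.2.2⟩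
        · obtain ⟨h1, h2⟩ := hmem x hx'
          simp only [List.contains_append, Bool.or_eq_false_iff] at h2
          exact ⟨h1, h2.1⟩
    · exact ih fresh

-- A's interleaved pass over the stripped tokens is the id-assignment fold over ulNew,
-- whenever d's keys are exactly d0's keys plus the tokens in fresh
theorem ulKey (d0 : PySem.Dict String Int) (ts : List String) :
    ∀ (fresh : List String) (d : PySem.Dict String Int) (n : Int),
    (∀ x, d.contains x = (d0.contains x || fresh.contains x)) →
    ts.foldl ulStepA' (d, n) = (ulNew d0 fresh ts).foldl ulAssign (d, n) := by
  induction ts with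
  | nil => intro fresh d n _; simp [ulNew]
  | cons t rest ih =>
    intro fresh d n h
    simp only [List.foldl_cons, ulStepA', ulNew]
    have hc : (t ≠ "" ∧ d.contains t = false) ↔
        (t ≠ "" ∧ d0.contains t = false ∧ fresh.contains t = false) := by
      rw [h t]
      constructor
      · rintro ⟨h1, h2⟩
        rcases Bool.or_eq_false_iff.mp h2 with ⟨ha, hb⟩
        exact ⟨h1, ha, hb⟩
      · rintro ⟨h1, h2, h3⟩
        refine ⟨h1, ?_⟩
        simp only [h2, Bool.false_or]
        exact h3
    by_cases hb : (t ≠ "" ∧ d0.contains t = false ∧ fresh.contains t = false)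
    · rw [if_pos (hc.mpr hb), if_pos hb]
      simp only [List.foldl_cons, ulAssign]
      apply ih
      intro x
      rw [PySem.Dict.contains_insert, h x]
      by_cases hx : x = t
      · subst hx; simp
      · simp [hx]
    · rw [if_neg (fun hh => hb (hc.mp hh)), if_neg hb]
      exact ih fresh d n h

-- the id-assignment fold over distinct fresh keys appends ulNumber to the items
theorem ulAssign_items (ws : List String) :
    ∀ (d : PySem.Dict String Int) (n : Int), ws.Nodup →
    (∀ w ∈ ws, d.contains w = false) →
    (ws.foldl ulAssign (d, n)).1.items = d.items ++ ulNumber n ws ∧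
    (ws.foldl ulAssign (d, n)).2 = n + (ws.length : Int) := by
  induction ws with
  | nil => intro d n _ _; simp [ulNumber]
  | cons w rest ih =>
    intro d n hnd hfree
    simp only [List.foldl_cons, ulAssign, ulNumber]
    have hw : d.contains w = false := hfree w (List.mem_cons_self)
    have hrest : ∀ x ∈ rest, (d.insert w n).contains x = false := by
      intro x hx
      rw [PySem.Dict.contains_insert]
      have hne : x ≠ w := fun hE => (List.nodup_cons.mp hnd).1 (hE ▸ hx)
      simp [hne, hfree x (List.mem_cons_of_mem _ hx)]
    obtain ⟨h1, h2⟩ := ih (d.insert w n) (n + 1) (List.nodup_cons.mp hnd).2 hrest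
    refine ⟨?_, ?_⟩
    · rw [h1, PySem.Dict.items_insert_of_not_contains _ _ hw]
      simp
    · rw [h2, List.length_cons]; push_cast; ring

-- nested doc/token folds flatten to a fold over all tokens
theorem ulFlatten {γ : Type} (docs : List (List (String × List String)))
    (f : γ → String → γ) (init : γ) :
    docs.foldl (fun acc doc => ((PySem.Dict.mk doc).getD "tokens" []).foldl f acc) init =
      (docs.flatMap (fun doc => (PySem.Dict.mk doc).getD "tokens" [])).foldl f init := by
  rw [List.foldl_flatMap]

-- ===== VERDICT =====
theorem update_lexicon_spec : Claim_equal_update_lexicon := by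
  intro lexicon next_id docs _
  unfold Spec_update_lexicon
  simp only [update_lexicon, update_lexicon_alt]
  rw [ulFlatten]
  have hmap : (docs.flatMap (fun doc => (PySem.Dict.mk doc).getD "tokens" [])).foldl ulStepA
      (PySem.Dict.mk lexicon, next_id) =
      ((docs.flatMap (fun doc => (PySem.Dict.mk doc).getD "tokens" [])).map PySem.Str.strip).foldl
        ulStepA' (PySem.Dict.mk lexicon, next_id) := by
    rw [List.foldl_map]
    rfl
  rw [hmap]
  set ts := (docs.flatMap (fun doc => (PySem.Dict.mk doc).getD "tokens" [])).map PySem.Str.strip with hts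
  rw [ulKey (PySem.Dict.mk lexicon) ts [] _ _ (by intro x; simp)]
  obtain ⟨hnd, hmem⟩ := ulNew_props (PySem.Dict.mk lexicon) ts []
  obtain ⟨h1, h2⟩ := ulAssign_items (ulNew (PySem.Dict.mk lexicon) [] ts)
    (PySem.Dict.mk lexicon) next_id hnd (fun w hw => (hmem w hw).1)
  rw [ulFreshB_eq]
  simp only [List.nil_append]
  exact Prod.ext h1 h2
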